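-- pv_equiv track=rewrite | github.com/aliyun/aliyun-odps-python-sdk | odps/df/backends/formatter.py | _get_level_lengths
-- ===== SOURCE A (Python) =====
-- def _get_level_lengths(levels, sentinel=''):
--     from itertools import groupby
--
--     def _make_grouper():
--         record = {'count': 0}
--
--         def grouper(x):
--             if x != sentinel:
--                 record['count'] += 1
--             return record['count']
--         return grouper
--
--     result = []
--     for lev in levels:
--         i = 0
--         f = _make_grouper()
--         recs = {}
--         for key, gpr in groupby(lev, f):
--             values = list(gpr)
--             recs[i] = len(values)
--             i += len(values)
--
--         result.append(recs)
--
--     return result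
-- ===== SOURCE B (Python) =====
-- def _get_level_lengths(levels, sentinel=''):
--     result = []
--     for lev in levels:
--         lev = list(lev)
--         if not lev:
--             result.append({})
--             continue
--         n = len(lev)
--         starts = [0] + [j for j in range(1, n) if lev[j] != sentinel]
--         ends = starts[1:] + [n]
--         result.append({a: b - a for a, b in zip(starts, ends)})
--     return result
-- ===== Notes on version B (the rewrite author's own statement) =====
-- stated objective: simpler
-- what changed: Replaces itertools.groupby driven by a stateful closure counter with a two-phase pass: first compute the run-start boundary positions (index 0 plus every position whose value differs from the sentinel), then difference consecutive boundaries to get each run's length.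
import Mathlib
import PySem

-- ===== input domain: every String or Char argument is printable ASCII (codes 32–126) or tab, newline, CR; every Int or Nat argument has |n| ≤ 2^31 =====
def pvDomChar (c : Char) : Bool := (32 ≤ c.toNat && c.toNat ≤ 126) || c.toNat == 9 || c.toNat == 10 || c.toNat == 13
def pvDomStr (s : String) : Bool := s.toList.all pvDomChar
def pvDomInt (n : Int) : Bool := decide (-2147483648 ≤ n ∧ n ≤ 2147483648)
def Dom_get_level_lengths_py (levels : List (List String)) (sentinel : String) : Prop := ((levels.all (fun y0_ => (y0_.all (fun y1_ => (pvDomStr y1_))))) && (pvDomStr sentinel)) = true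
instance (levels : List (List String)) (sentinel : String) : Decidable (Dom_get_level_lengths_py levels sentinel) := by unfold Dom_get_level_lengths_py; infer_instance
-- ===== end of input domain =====

-- B replaces A's groupby-with-stateful-closure by a two-phase pass: a run-start index
-- table followed by differencing consecutive boundaries (objective: simpler decomposition).

-- ===== PORT A =====
-- itertools.groupby with A's grouper: an element continues the current group iff the
-- grouper's count is unchanged; pvTakeRunA consumes the remainder of one group.
def pvTakeRunA (s : String) (c : Int) : List String → (List String × List String)
  | [] => ([], [])
  | y :: ys =>
      let cy := if y ≠ s then c + 1 else c
      if cy = c then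
        let p := pvTakeRunA s c ys
        (y :: p.1, p.2)
      else ([], y :: ys)

theorem pvTakeRunA_snd_length (s : String) (c : Int) (ys : List String) :
    (pvTakeRunA s c ys).2.length ≤ ys.length := by
  induction ys with
  | nil => simp [pvTakeRunA]
  | cons y ys ih =>
      simp only [pvTakeRunA]
      split <;> simp
      omega

-- the inner 'for key, gpr in groupby(lev, f)' loop: state (count, i), recs built in order
def pvGrpA (s : String) (c : Int) (i : Int) : List String → List (Int × Int)
  | [] => []
  | x :: xs =>
      let c' := if x ≠ s then c + 1 else c
      let p := pvTakeRunA s c' xs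
      (i, (p.1.length : Int) + 1) :: pvGrpA s c' (i + p.1.length + 1) p.2
  termination_by lev => lev.length
  decreasing_by
    simp only [List.length_cons]
    exact Nat.lt_succ_of_le (pvTakeRunA_snd_length _ _ _)

def get_level_lengths_py (levels : List (List String)) (sentinel : String) : List (List (Int × Int)) :=
  levels.map (fun lev => pvGrpA sentinel 0 0 lev)

-- ===== PORT B =====
-- starts = [0] + [j for j in range(1, n) if lev[j] != sentinel]
def pvStartsB (sentinel : String) (lev : List String) : List Nat :=
  0 :: (List.range' 1 (lev.length - 1)).filter (fun j => lev.getD j "" ≠ sentinel)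

def get_level_lengths_py_alt (levels : List (List String)) (sentinel : String) : List (List (Int × Int)) :=
  levels.map (fun lev =>
    if lev.isEmpty then []
    else
      let n := lev.length
      let starts := pvStartsB sentinel lev
      let ends := starts.tail ++ [n]
      (starts.zip ends).map (fun p => ((p.1 : Int), (p.2 : Int) - (p.1 : Int))))

-- ===== PRECONDITION & SPEC =====
def Spec_get_level_lengths_py (levels : List (List String)) (sentinel : String) (out : List (List (Int × Int))) : Prop := out = get_level_lengths_py_alt levels sentinel
instance (levels : List (List String)) (sentinel : String) (out : List (List (Int × Int))) : Decidable (Spec_get_level_lengths_py levels sentinel out) := by unfold Spec_get_level_lengths_py; infer_instance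

-- ===== CLAIM (what is proved, stated in full; the proofs are below) =====
def Claim_equal_get_level_lengths_py : Prop := ∀ (levels : List (List String)) (sentinel : String), Dom_get_level_lengths_py levels sentinel → Spec_get_level_lengths_py levels sentinel (get_level_lengths_py levels sentinel)

-- ===== LEMMAS AND PROOFS =====

-- positions j in xs with xs[j] ≠ s
def pvPosNS (s : String) (xs : List String) : List Nat :=
  (List.range xs.length).filter (fun j => xs.getD j "" ≠ s)

-- difference consecutive boundaries, last one against n
def pvGaps (n : Nat) : List Nat → List (Int × Int)
  | [] => []
  | [a] => [((a : Int), (n : Int) - (a : Int))]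
  | a :: b :: rest => (((a : Int), (b : Int) - (a : Int))) :: pvGaps n (b :: rest)

theorem pvZip_eq_gaps (n : Nat) (starts : List Nat) :
    (starts.zip (starts.tail ++ [n])).map (fun p => ((p.1 : Int), (p.2 : Int) - (p.1 : Int)))
      = pvGaps n starts := by
  induction starts with
  | nil => simp [pvGaps]
  | cons a t ih =>
      cases t with
      | nil => simp [pvGaps]
      | cons b t' =>
          simp only [List.tail_cons, List.cons_append, List.zip_cons_cons, List.map_cons, pvGaps]
          exact congrArg _ ih

theorem pvPosNS_cons (s : String) (y : String) (ys : List String) :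
    pvPosNS s (y :: ys) = (if y ≠ s then [0] else []) ++ (pvPosNS s ys).map (· + 1) := by
  simp only [pvPosNS, List.length_cons, List.range_succ_eq_map, List.filter_cons,
    List.filter_map]
  by_cases hy : y = s <;>
    · simp [hy, Function.comp_def, Nat.succ_eq_add_one]
      exact List.map_congr_left fun a _ => rfl

theorem pvTakeRunA_eq (s : String) (c : Int) (ys : List String) :
    pvTakeRunA s c ys = (ys.takeWhile (fun y => y == s), ys.dropWhile (fun y => y == s)) := by
  induction ys generalizing c with
  | nil => simp [pvTakeRunA]
  | cons y ys ih =>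
      by_cases hy : y = s
      · simp [pvTakeRunA, hy, ih]
      · have : ¬ (c + 1 = c) := by omega
        simp [pvTakeRunA, hy, this]

theorem pvStartsB_eq (s : String) (x : String) (xs : List String) :
    pvStartsB s (x :: xs) = 0 :: (pvPosNS s xs).map (· + 1) := by
  simp only [pvStartsB, pvPosNS, List.length_cons, Nat.add_sub_cancel, List.cons.injEq,
    true_and, List.range'_eq_map_range, List.filter_map, Function.comp_def]
  have h1 : ∀ j : Nat, (x :: xs).getD (1 + j) "" = xs.getD j "" := by
    intro j; rw [Nat.add_comm]; simp
  simp only [h1]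
  exact List.map_congr_left fun a _ => by omega

theorem pvPosNS_append_sent (s : String) : ∀ (t : List String), (∀ z ∈ t, z = s) →
    ∀ d, pvPosNS s (t ++ d) = (pvPosNS s d).map (· + t.length) := by
  intro t
  induction t with
  | nil => intro _ d; simp
  | cons z t ih =>
      intro ht d
      have hz : z = s := ht z (by simp)
      rw [List.cons_append, pvPosNS_cons]
      rw [ih (fun w hw => ht w (by simp [hw])) d]
      simp [hz, List.map_map]

theorem pvMain (s : String) : ∀ (m : Nat) (x : String) (xs : List String), xs.length ≤ m →
    ∀ (c : Int) (i : Nat),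
    pvGrpA s c (i : Int) (x :: xs)
      = pvGaps (i + xs.length + 1) ((0 :: (pvPosNS s xs).map (· + 1)).map (fun j => i + j)) := by
  intro m
  induction m with
  | zero =>
      intro x xs hlen c i
      have hx : xs = [] := List.eq_nil_of_length_eq_zero (Nat.le_zero.mp hlen)
      subst hx
      rw [pvGrpA]
      simp [pvTakeRunA, pvGrpA, pvPosNS, pvGaps]
  | succ m ih =>
      intro x xs hlen c i
      rw [pvGrpA, pvTakeRunA_eq]
      set t := xs.takeWhile (fun y => y == s) with ht
      set d := xs.dropWhile (fun y => y == s) with hd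
      have hxs : t ++ d = xs := List.takeWhile_append_dropWhile
      have htall : ∀ z ∈ t, z = s := by
        intro z hz
        have := List.mem_takeWhile_imp (ht ▸ hz)
        simpa using this
      have hpos : pvPosNS s xs = (pvPosNS s d).map (· + t.length) := by
        rw [← hxs]; exact pvPosNS_append_sent s t htall d
      cases hdc : d with
      | nil =>
          have hxt : xs.length = t.length := by rw [← hxs, hdc]; simp
          have hpos0 : pvPosNS s xs = [] := by rw [hpos, hdc]; simp [pvPosNS]
          dsimp only
          rw [pvGrpA]
          simp only [hpos0, List.map_nil, List.map_cons, pvGaps, Prod.mk.injEq,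
            List.cons.injEq, and_true]
          rw [hxt]
          push_cast
          repeat' constructor
          all_goals first | trivial | ring
      | cons r rs =>
          have hr : ¬ (r = s) := by
            have := List.head?_dropWhile_not (fun y => y == s) xs
            rw [← hd, hdc] at this
            simpa using this
          have hlen2 : rs.length ≤ m := by
            have h1 : d.length ≤ xs.length := by rw [← hxs]; simp
            rw [hdc] at h1; simp at h1; omega
          have hposd : pvPosNS s d = 0 :: (pvPosNS s rs).map (· + 1) := by
            rw [hdc, pvPosNS_cons]; simp [hr]
          have hN : xs.length = t.length + rs.length + 1 := by
            have := congrArg List.length hxs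
            rw [hdc] at this; simp at this; omega
          have hlist : ((0 :: (pvPosNS s xs).map (· + 1)).map (fun j => i + j))
              = i :: ((i + t.length + 1) ::
                  (pvPosNS s rs).map (fun p => (i + t.length + 1) + (p + 1))) := by
            rw [hpos, hposd]
            simp only [List.map_cons, List.map_map, Function.comp_def]
            congr 1
            congr 1
            · omega
            exact List.map_congr_left fun p _ => by omega
          rw [hlist, pvGaps]
          have hcast : ((i : Int) + (t.length : Int) + 1) = ((i + t.length + 1 : Nat) : Int) := by
            push_cast; ring
          have hih := ih r rs hlen2 (if x ≠ s then c + 1 else c) (i + t.length + 1)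
          simp only [List.map_cons, List.map_map, Function.comp_def] at hih
          dsimp only
          rw [hcast, hih]
          congr 1
          · simp [Prod.ext_iff]
            omega
          · congr 1
            omega

-- ===== VERDICT (by name: the statement is the Claim_ definition above) =====
theorem get_level_lengths_py_spec : Claim_equal_get_level_lengths_py := by
  intro levels sentinel _
  unfold Spec_get_level_lengths_py get_level_lengths_py get_level_lengths_py_alt
  refine List.map_congr_left (fun lev _ => ?_)
  cases lev with
  | nil => simp [pvGrpA]
  | cons x xs =>
      have h := pvMain sentinel xs.length x xs (le_refl _) 0 0
      have hz := pvZip_eq_gaps (xs.length + 1) (0 :: (pvPosNS sentinel xs).map (· + 1))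
      simp only [List.tail_cons] at hz
      simp only [Nat.cast_zero, Nat.zero_add] at h
      simp only [List.isEmpty_cons, Bool.false_eq_true, if_false, List.length_cons,
        pvStartsB_eq, List.tail_cons, hz]
      rw [h]
      congr 1
      simp
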